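-- pv_equiv track=rewrite | github.com/SS-hj/coding_test | programmers/161989.py | solution
-- ===== SOURCE A (Python) =====
-- from collections import deque
--
-- def solution(n, m, section):
--     cnt = 0
--     q = deque(section)
--     while q:
--         v = q.popleft()
--         cnt += 1
--         while q and q[0] < v+m:
--             q.popleft()
--     return cnt
-- ===== SOURCE B (Python) =====
-- def solution(n, m, section):
--     cnt = 0
--     painted = None
--     for v in section:
--         if painted is None or v >= painted:
--             cnt += 1
--             painted = v + m
--     return cnt
-- ===== Notes on version B (the rewrite author's own statement) =====
-- stated objective: simpler
-- what changed: Replaced the deque with an inner popleft-skip loop by a single flat for loop over section maintaining one covered-up-to boundary ('painted'); the nested while loop and the deque disappear.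
import Mathlib
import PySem

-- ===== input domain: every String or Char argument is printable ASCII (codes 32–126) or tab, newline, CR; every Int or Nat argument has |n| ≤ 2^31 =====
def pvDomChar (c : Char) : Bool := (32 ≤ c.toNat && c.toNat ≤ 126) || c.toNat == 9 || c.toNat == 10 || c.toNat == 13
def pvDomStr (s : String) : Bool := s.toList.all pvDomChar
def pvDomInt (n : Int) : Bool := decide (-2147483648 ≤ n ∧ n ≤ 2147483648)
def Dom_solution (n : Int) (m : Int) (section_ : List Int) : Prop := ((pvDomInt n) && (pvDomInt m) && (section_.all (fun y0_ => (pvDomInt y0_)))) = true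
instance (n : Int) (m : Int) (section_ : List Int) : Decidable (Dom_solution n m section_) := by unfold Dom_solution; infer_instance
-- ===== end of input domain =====

-- B replaces A's deque with nested popleft-skip loop by one flat pass keeping a covered-up-to boundary (simpler).

-- ===== PORT A =====
-- inner `while q and q[0] < v+m: q.popleft()` of A
def solDropLt (b : Int) : List Int → List Int
  | [] => []
  | x :: xs => if x < b then solDropLt b xs else x :: xs

theorem solDropLt_length (b : Int) (l : List Int) : (solDropLt b l).length ≤ l.length := by
  induction l with
  | nil => simp [solDropLt]
  | cons x xs ih =>
    simp only [solDropLt]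
    split
    · exact Nat.le_succ_of_le ih
    · simp

-- outer `while q:` loop of A
def solLoop (m : Int) : List Int → Int
  | [] => 0
  | v :: q => 1 + solLoop m (solDropLt (v + m) q)
  termination_by l => l.length
  decreasing_by
    exact Nat.lt_succ_of_le (solDropLt_length _ _)

def solution (n : Int) (m : Int) (section_ : List Int) : Int := solLoop m section_

-- ===== PORT B =====
def solution_alt (n : Int) (m : Int) (section_ : List Int) : Int :=
  (section_.foldl
    (fun st v =>
      match st.2 with
      | none => (st.1 + 1, some (v + m))
      | some b => if v ≥ b then (st.1 + 1, some (v + m)) else st)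
    ((0 : Int), (none : Option Int))).1

-- ===== PRECONDITION & SPEC =====
def Spec_solution (n : Int) (m : Int) (section_ : List Int) (out : Int) : Prop := out = solution_alt n m section_
instance (n : Int) (m : Int) (section_ : List Int) (out : Int) : Decidable (Spec_solution n m section_ out) := by unfold Spec_solution; infer_instance

-- ===== CLAIM (what is proved, stated in full; the proofs are below) =====
def Claim_equal_solution : Prop := ∀ (n : Int) (m : Int) (section_ : List Int), Dom_solution n m section_ → Spec_solution n m section_ (solution n m section_)

-- ===== LEMMAS AND PROOFS =====
def solStep (m : Int) (st : Int × Option Int) (v : Int) : Int × Option Int :=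
  match st.2 with
  | none => (st.1 + 1, some (v + m))
  | some b => if v ≥ b then (st.1 + 1, some (v + m)) else st

theorem solFold_some (m b c : Int) (l : List Int) :
    (l.foldl (solStep m) (c, some b)).1 = c + solLoop m (solDropLt b l) := by
  induction l generalizing b c with
  | nil => simp [solLoop, solDropLt]
  | cons x xs ih =>
    by_cases h : x < b
    · have hnot : ¬ x ≥ b := by omega
      simp only [List.foldl_cons, solStep, hnot, if_neg, solDropLt, if_pos h]
      exact ih b c
    · have hge : x ≥ b := by omega
      simp only [List.foldl_cons, solStep, if_pos hge, solDropLt, if_neg h]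
      rw [show solLoop m (x :: xs) = 1 + solLoop m (solDropLt (x + m) xs) by rw [solLoop]]
      rw [ih (x + m) (c + 1)]
      ring

theorem solution_eq_alt (n m : Int) (l : List Int) : solution n m l = solution_alt n m l := by
  cases l with
  | nil => simp [solution, solution_alt, solLoop]
  | cons x xs =>
    show solLoop m (x :: xs) = (List.foldl (solStep m) (0, none) (x :: xs)).1
    simp only [List.foldl_cons, solStep]
    rw [solFold_some]
    rw [show solLoop m (x :: xs) = 1 + solLoop m (solDropLt (x + m) xs) by rw [solLoop]]
    ring

-- ===== VERDICT (by name: the statement is the Claim_ definition above) =====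
theorem solution_spec : Claim_equal_solution := by
  intro n m s _
  exact solution_eq_alt n m s
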